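-- pv_equiv track=rewrite | github.com/JoakimOsterman/AdventOfCode | 2024/12/day12.py | get_region_perimeter
-- ===== SOURCE A (Python) =====
-- def get_neighbors(x, y, garden_map):
--     return [((x + dx, y + dy), garden_map.get((x + dx, y + dy))) for dx, dy in [(1, 0), (0, 1), (-1, 0), (0, -1)] if garden_map.get((x + dx, y + dy)) is not None]
--
-- def get_region_perimeter(region):
--     perimiter = 0
--     for (x, y), char in region.items():
--         sides = 4
--         for (adj_x, adj_y), adj_char in get_neighbors(x, y, region):
--             if adj_char == char:
--                 sides -= 1
--         perimiter += sides
--     return perimiter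
-- ===== SOURCE B (Python) =====
-- def cell_edges(x, y, char):
--     return (("V", x, y, char), ("V", x + 1, y, char),
--             ("H", x, y, char), ("H", x, y + 1, char))
--
-- def get_region_perimeter(region):
--     edge_count = {}
--     for (x, y), char in region.items():
--         for edge in cell_edges(x, y, char):
--             edge_count[edge] = edge_count.get(edge, 0) + 1
--     total = 0
--     for count in edge_count.values():
--         if count == 1:
--             total += 1
--     return total
-- ===== Notes on version B (the rewrite author's own statement) =====
-- stated objective: alternative
-- what changed: Instead of per-cell neighbor lookups in the region dict (4 directions, subtracting shared sides), B never looks up neighbors: it builds a counter of the 4n unit edge segments keyed by (orientation, position, char) and returns the number of edge keys seen exactly once, since an edge shared by two same-char cells is counted twice and interior to the region.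
import Mathlib
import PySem

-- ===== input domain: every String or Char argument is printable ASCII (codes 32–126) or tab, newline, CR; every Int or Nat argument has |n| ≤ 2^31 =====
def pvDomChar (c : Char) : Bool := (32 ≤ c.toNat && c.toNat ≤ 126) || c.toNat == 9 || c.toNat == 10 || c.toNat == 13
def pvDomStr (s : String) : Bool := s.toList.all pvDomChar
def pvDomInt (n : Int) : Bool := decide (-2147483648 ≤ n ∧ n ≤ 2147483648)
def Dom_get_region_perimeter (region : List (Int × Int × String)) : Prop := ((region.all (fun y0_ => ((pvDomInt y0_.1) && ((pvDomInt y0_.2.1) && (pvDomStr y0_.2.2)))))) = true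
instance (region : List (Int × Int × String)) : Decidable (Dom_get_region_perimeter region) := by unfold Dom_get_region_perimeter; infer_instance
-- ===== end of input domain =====

-- B replaces A's per-cell neighbour lookups by a counter over the 4n unit edge segments
-- (keyed by orientation, position and char): the perimeter is the number of edge keys
-- that occur exactly once (an edge occurring twice is shared by two same-char cells).

-- ===== PORT A =====
-- garden_map.get((x,y)) on the association list representing the dict: first key match
def pvLookup (m : List (Int × Int × String)) (x y : Int) : Option String :=
  match m with
  | [] => none
  | (a, b, s) :: t => if a = x ∧ b = y then some s else pvLookup t x y

def get_neighbors (x y : Int) (garden_map : List (Int × Int × String)) :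
    List ((Int × Int) × String) :=
  ([(1, 0), (0, 1), (-1, 0), (0, -1)] : List (Int × Int)).filterMap (fun d =>
    match pvLookup garden_map (x + d.1) (y + d.2) with
    | some s => some ((x + d.1, y + d.2), s)
    | none => none)

def get_region_perimeter (region : List (Int × Int × String)) : Int :=
  region.foldl (fun perimiter p =>
    perimiter + (get_neighbors p.1 p.2.1 region).foldl
      (fun sides q => if q.2 = p.2.2 then sides - 1 else sides) 4) 0

-- ===== PORT B =====
-- the 4 unit edges of cell (x,y), tagged with the cell's char (Source B's cell_edges)
def cell_edges (x y : Int) (char : String) : List (String × Int × Int × String) :=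
  [("V", x, y, char), ("V", x + 1, y, char), ("H", x, y, char), ("H", x, y + 1, char)]

def get_region_perimeter_alt (region : List (Int × Int × String)) : Int :=
  (region.foldl (fun d p =>
    (cell_edges p.1 p.2.1 p.2.2).foldl
      (fun d e => d.insert e (d.getD e 0 + 1)) d)
    (PySem.Dict.empty : PySem.Dict (String × Int × Int × String) Int)).values.foldl
    (fun total c => if c = 1 then total + 1 else total) 0

-- ===== PRECONDITION & SPEC =====
-- A Python dict's keys are unique, so the association list representing the argument
-- never contains two entries with the same (x, y) key; Pre_ states exactly that.
def Pre_get_region_perimeter (region : List (Int × Int × String)) : Prop :=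
  (region.map (fun p => (p.1, p.2.1))).Nodup
instance (region : List (Int × Int × String)) : Decidable (Pre_get_region_perimeter region) := by
  unfold Pre_get_region_perimeter; infer_instance
def pvWitness_get_region_perimeter : (List (Int × Int × String)) :=
  [(0, 0, "A"), (1, 0, "A"), (1, 1, "B")]

def Spec_get_region_perimeter (region : List (Int × Int × String)) (out : Int) : Prop := out = get_region_perimeter_alt region
instance (region : List (Int × Int × String)) (out : Int) : Decidable (Spec_get_region_perimeter region out) := by unfold Spec_get_region_perimeter; infer_instance

-- ===== CLAIM (what is proved, stated in full; the proofs are below) =====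
def Claim_equal_get_region_perimeter : Prop := ∀ (region : List (Int × Int × String)), Dom_get_region_perimeter region → Pre_get_region_perimeter region → Spec_get_region_perimeter region (get_region_perimeter region)

-- ===== LEMMAS AND PROOFS =====

-- indicator of a successful same-char lookup
def pvInd (L : List (Int × Int × String)) (x y : Int) (s : String) : Int :=
  if pvLookup L x y = some s then 1 else 0

-- the flat list of all 4n edge segments of the region
def pvEdges (L : List (Int × Int × String)) : List (String × Int × Int × String) :=
  L.flatMap (fun p => cell_edges p.1 p.2.1 p.2.2)

theorem pv_sum_map_const_sub {α : Type} (L : List α) (f : α → Int) :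
    (L.map (fun x => (4:Int) - f x)).sum = 4 * (L.length : Int) - (L.map f).sum := by
  induction L with
  | nil => simp
  | cons a t ih => simp [ih]; ring

theorem pv_foldl_sub_count (N : List ((Int × Int) × String)) (ch : String) (a : Int) :
    N.foldl (fun s q => if q.2 = ch then s - 1 else s) a
      = a - (N.map (fun q => if q.2 = ch then (1:Int) else 0)).sum := by
  induction N generalizing a with
  | nil => simp
  | cons q t ih =>
      simp only [List.foldl_cons, List.map_cons, List.sum_cons]
      split_ifs with h <;> rw [ih] <;> ring

theorem pv_cell (L : List (Int × Int × String)) (x y : Int) (ch : String) :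
    (get_neighbors x y L).foldl (fun s q => if q.2 = ch then s - 1 else s) 4
      = 4 - (pvInd L (x + 1) y ch + pvInd L x (y + 1) ch
             + pvInd L (x + (-1)) y ch + pvInd L x (y + (-1)) ch) := by
  rw [pv_foldl_sub_count]
  simp only [get_neighbors, List.filterMap_cons, List.filterMap_nil, add_zero]
  rcases h1 : pvLookup L (x + 1) y with _ | s1 <;>
    rcases h2 : pvLookup L x (y + 1) with _ | s2 <;>
      rcases h3 : pvLookup L (x + (-1)) y with _ | s3 <;>
        rcases h4 : pvLookup L x (y + (-1)) with _ | s4 <;>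
          simp [pvInd, h1, h2, h3, h4] <;> split_ifs <;> ring

theorem pv_lookup_mem (L : List (Int × Int × String)) (x y : Int) (s : String)
    (h : pvLookup L x y = some s) : (x, y, s) ∈ L := by
  induction L with
  | nil => simp [pvLookup] at h
  | cons a t ih =>
      obtain ⟨ax, ay, as'⟩ := a
      simp only [pvLookup] at h
      split_ifs at h with hc
      · obtain ⟨hx, hy⟩ := hc
        simp at h
        subst hx; subst hy; subst h
        exact List.mem_cons_self
      · exact List.mem_cons_of_mem _ (ih h)

theorem pv_mem_lookup (L : List (Int × Int × String)) (x y : Int) (s : String)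
    (hnd : (L.map (fun p => (p.1, p.2.1))).Nodup)
    (h : (x, y, s) ∈ L) : pvLookup L x y = some s := by
  induction L with
  | nil => simp at h
  | cons a t ih =>
      obtain ⟨ax, ay, as'⟩ := a
      simp only [List.map_cons, List.nodup_cons] at hnd
      rcases List.mem_cons.mp h with heq | hmem
      · injection heq with h1 h23
        injection h23 with h2 h3
        subst h1; subst h2; subst h3
        simp [pvLookup]
      · simp only [pvLookup]
        split_ifs with hc
        · exfalso
          obtain ⟨hx, hy⟩ := hc
          apply hnd.1
          have : ((x, y) : Int × Int) ∈ t.map (fun p => (p.1, p.2.1)) :=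
            List.mem_map.mpr ⟨(x, y, s), hmem, rfl⟩
          rw [hx, hy]; exact this
        · exact ih hnd.2 hmem

-- A equals 4n minus the sum of same-char indicators over all four directions
theorem pv_A_eq (L : List (Int × Int × String)) :
    get_region_perimeter L
      = 4 * (L.length : Int)
        - (L.map (fun p => pvInd L (p.1 + 1) p.2.1 p.2.2 + pvInd L p.1 (p.2.1 + 1) p.2.2
            + pvInd L (p.1 + (-1)) p.2.1 p.2.2 + pvInd L p.1 (p.2.1 + (-1)) p.2.2)).sum := by
  unfold get_region_perimeter
  rw [PySem.List.foldl_add]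
  rw [List.map_congr_left (fun p _ => pv_cell L p.1 p.2.1 p.2.2)]
  rw [pv_sum_map_const_sub]
  ring

-- a nested per-cell fold over the cell's edges is the fold over the flat edge list
theorem pv_foldl_flatMap {α β γ : Type} (L : List α) (g : α → List β)
    (f : γ → β → γ) (init : γ) :
    L.foldl (fun d p => (g p).foldl f d) init = (L.flatMap g).foldl f init := by
  induction L generalizing init with
  | nil => simp
  | cons a t ih => simp [List.flatMap_cons, List.foldl_append, ih]

-- B's dict is the counter of the edge list
theorem pv_B_dict (L : List (Int × Int × String)) :
    get_region_perimeter_alt L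
      = (PySem.Dict.counter (pvEdges L)).values.foldl
          (fun total c => if c = 1 then total + 1 else total) 0 := by
  unfold get_region_perimeter_alt
  rw [pv_foldl_flatMap]
  rfl

-- under Pre_, the multiplicity of a cell in the region is its lookup indicator
theorem pv_count_eq_ind (L : List (Int × Int × String)) (x y : Int) (s : String)
    (hnd : (L.map (fun p => (p.1, p.2.1))).Nodup) :
    (L.count ((x, y, s) : Int × Int × String) : Int) = pvInd L x y s := by
  unfold pvInd
  split_ifs with h
  · have hmem := pv_lookup_mem L x y s h
    have h1 : L.count ((x, y, s) : Int × Int × String) = 1 :=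
      List.count_eq_one_of_mem hnd.of_map hmem
    rw [h1]; rfl
  · have : ((x, y, s) : Int × Int × String) ∉ L := fun hm => h (pv_mem_lookup L x y s hnd hm)
    rw [List.count_eq_zero.mpr this]; rfl

-- multiplicity of a vertical edge key in the flat edge list
theorem pv_count_edge_V (L : List (Int × Int × String)) (a b : Int) (s : String) :
    (pvEdges L).count (("V", a, b, s) : String × Int × Int × String)
      = L.count ((a, b, s) : Int × Int × String) + L.count ((a - 1, b, s) : Int × Int × String) := by
  induction L with
  | nil => simp [pvEdges]
  | cons p t ih =>
      obtain ⟨px, py, ps⟩ := p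
      simp only [pvEdges, List.flatMap_cons, List.count_append, cell_edges] at ih ⊢
      rw [ih]
      simp only [List.count_cons, List.count_nil, beq_iff_eq, Prod.mk.injEq]
      have h1 : ((px + 1 = a ∧ py = b ∧ ps = s) ↔ (px = a - 1 ∧ py = b ∧ ps = s)) := by
        constructor <;> rintro ⟨h, h2, h3⟩ <;> exact ⟨by omega, h2, h3⟩
      have h2 : (("V":String) = "V" ∧ px = a ∧ py = b ∧ ps = s) ↔ (px = a ∧ py = b ∧ ps = s) := by
        simp
      have h3 : ¬ (("H":String) = "V") := by decide
      split_ifs <;> simp_all <;> omega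

-- multiplicity of a horizontal edge key in the flat edge list
theorem pv_count_edge_H (L : List (Int × Int × String)) (a b : Int) (s : String) :
    (pvEdges L).count (("H", a, b, s) : String × Int × Int × String)
      = L.count ((a, b, s) : Int × Int × String) + L.count ((a, b - 1, s) : Int × Int × String) := by
  induction L with
  | nil => simp [pvEdges]
  | cons p t ih =>
      obtain ⟨px, py, ps⟩ := p
      simp only [pvEdges, List.flatMap_cons, List.count_append, cell_edges] at ih ⊢
      rw [ih]
      simp only [List.count_cons, List.count_nil, beq_iff_eq, Prod.mk.injEq]
      have h1 : ((px = a ∧ py + 1 = b ∧ ps = s) ↔ (px = a ∧ py = b - 1 ∧ ps = s)) := by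
        constructor <;> rintro ⟨h, h2, h3⟩ <;> exact ⟨h, by omega, h3⟩
      have h2 : (("H":String) = "H" ∧ px = a ∧ py = b ∧ ps = s) ↔ (px = a ∧ py = b ∧ ps = s) := by
        simp
      have h3 : ¬ (("V":String) = "H") := by decide
      split_ifs <;> simp_all <;> omega

-- a list of distinct elements with the same members as l has as many count-1 members as l
theorem pv_countP_uniq {α : Type} [BEq α] [LawfulBEq α] (S l : List α)
    (hS : S.Nodup) (hm : ∀ a, a ∈ S ↔ a ∈ l) :
    S.countP (fun e => l.count e == 1) = l.countP (fun e => l.count e == 1) := by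
  rw [List.countP_eq_length_filter, List.countP_eq_length_filter]
  apply List.Perm.length_eq
  have h1 : (S.filter (fun e => l.count e == 1)).Nodup := hS.filter _
  have h2 : (l.filter (fun e => l.count e == 1)).Nodup := by
    rw [List.nodup_iff_count_le_one]
    intro a
    by_cases hmem2 : a ∈ l.filter (fun e => l.count e == 1)
    · have hp := (List.mem_filter.mp hmem2).2
      simp only [beq_iff_eq] at hp
      calc List.count a (l.filter (fun e => l.count e == 1)) ≤ List.count a l :=
          List.Sublist.count_le a List.filter_sublist
        _ ≤ 1 := le_of_eq hp
    · simp [List.count_eq_zero.mpr hmem2]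
  exact (List.perm_ext_iff_of_nodup h1 h2).mpr (by
    intro a
    simp only [List.mem_filter, hm a])

-- countP distributes over the per-cell blocks of the flat edge list
theorem pv_countP_flatMap {α β : Type} (L : List α) (g : α → List β) (p : β → Bool) :
    (L.flatMap g).countP p = (L.map (fun x => (g x).countP p)).sum := by
  induction L with
  | nil => simp
  | cons a t ih => simp [List.flatMap_cons, List.countP_append, ih]

-- per cell, the number of its 4 edges that are globally unique is 4 minus its indicators
theorem pv_cellB (L : List (Int × Int × String)) (x y : Int) (s : String)
    (hnd : (L.map (fun p => (p.1, p.2.1))).Nodup)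
    (hmem : ((x, y, s) : Int × Int × String) ∈ L) :
    (((cell_edges x y s).countP (fun e => (pvEdges L).count e == 1) : Nat) : Int)
      = 4 - (pvInd L (x + 1) y s + pvInd L x (y + 1) s
             + pvInd L (x + (-1)) y s + pvInd L x (y + (-1)) s) := by
  have hself : (L.count ((x, y, s) : Int × Int × String) : Int) = 1 := by
    rw [pv_count_eq_ind L x y s hnd, pvInd, if_pos (pv_mem_lookup L x y s hnd hmem)]
  simp only [cell_edges, List.countP_cons, List.countP_nil, beq_iff_eq]
  have e1 : (pvEdges L).count (("V", x, y, s) : String × Int × Int × String)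
      = L.count ((x, y, s) : Int × Int × String) + L.count ((x - 1, y, s) : Int × Int × String) :=
    pv_count_edge_V L x y s
  have e2 : (pvEdges L).count (("V", x + 1, y, s) : String × Int × Int × String)
      = L.count ((x + 1, y, s) : Int × Int × String) + L.count ((x, y, s) : Int × Int × String) := by
    rw [pv_count_edge_V L (x + 1) y s, show (x + 1 - 1) = x from by ring]
  have e3 : (pvEdges L).count (("H", x, y, s) : String × Int × Int × String)
      = L.count ((x, y, s) : Int × Int × String) + L.count ((x, y - 1, s) : Int × Int × String) :=
    pv_count_edge_H L x y s
  have e4 : (pvEdges L).count (("H", x, y + 1, s) : String × Int × Int × String)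
      = L.count ((x, y + 1, s) : Int × Int × String) + L.count ((x, y, s) : Int × Int × String) := by
    rw [pv_count_edge_H L x (y + 1) s, show (y + 1 - 1) = y from by ring]
  have i1 := pv_count_eq_ind L (x + 1) y s hnd
  have i2 := pv_count_eq_ind L x (y + 1) s hnd
  have i3 := pv_count_eq_ind L (x - 1) y s hnd
  have i4 := pv_count_eq_ind L x (y - 1) s hnd
  have hc : L.count ((x, y, s) : Int × Int × String) = 1 := by exact_mod_cast hself
  rw [e1, e2, e3, e4, hc]
  have hb1 : pvInd L (x + 1) y s = 0 ∨ pvInd L (x + 1) y s = 1 := by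
    unfold pvInd; split_ifs <;> simp
  have hb2 : pvInd L x (y + 1) s = 0 ∨ pvInd L x (y + 1) s = 1 := by
    unfold pvInd; split_ifs <;> simp
  have hb3 : pvInd L (x - 1) y s = 0 ∨ pvInd L (x - 1) y s = 1 := by
    unfold pvInd; split_ifs <;> simp
  have hb4 : pvInd L x (y - 1) s = 0 ∨ pvInd L x (y - 1) s = 1 := by
    unfold pvInd; split_ifs <;> simp
  rw [show x + (-1) = x - 1 from by ring, show y + (-1) = y - 1 from by ring]
  split_ifs with c1 c2 c3 c4 <;> omega

-- B equals 4n minus the same indicator sum as A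
theorem pv_B_eq (L : List (Int × Int × String))
    (hnd : (L.map (fun p => (p.1, p.2.1))).Nodup) :
    get_region_perimeter_alt L
      = 4 * (L.length : Int)
        - (L.map (fun p => pvInd L (p.1 + 1) p.2.1 p.2.2 + pvInd L p.1 (p.2.1 + 1) p.2.2
            + pvInd L (p.1 + (-1)) p.2.1 p.2.2 + pvInd L p.1 (p.2.1 + (-1)) p.2.2)).sum := by
  rw [pv_B_dict]
  rw [show (PySem.Dict.counter (pvEdges L)).values
      = (PySem.Dict.counter (pvEdges L)).items.map Prod.snd from rfl]
  rw [PySem.Dict.items_counter]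
  rw [PySem.List.foldl_ite_add_one]
  rw [List.map_map, List.countP_map]
  have hcp : (PySem.Set.ofList (pvEdges L)).countP
      ((fun c : Int => decide (c = 1)) ∘ (Prod.snd ∘ (fun k => (k, ((pvEdges L).count k : Int)))))
      = (PySem.Set.ofList (pvEdges L)).countP (fun e => (pvEdges L).count e == 1) := by
    apply List.countP_congr
    intro e _
    by_cases hc : (pvEdges L).count e = 1 <;>
      simp [hc, Function.comp, Nat.cast_eq_one]
  rw [hcp]
  rw [pv_countP_uniq (PySem.Set.ofList (pvEdges L)) (pvEdges L)
        (PySem.Set.nodup_ofList _) (fun a => PySem.Set.mem_ofList _ _)]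
  rw [show (pvEdges L).countP (fun e => (pvEdges L).count e == 1)
      = (L.map (fun p =>
          (cell_edges p.1 p.2.1 p.2.2).countP (fun e => (pvEdges L).count e == 1))).sum
    from pv_countP_flatMap L _ _]
  have hcast : ((((L.map (fun p =>
        (cell_edges p.1 p.2.1 p.2.2).countP (fun e => (pvEdges L).count e == 1))).sum : Nat)) : Int)
      = (L.map (fun p => (((cell_edges p.1 p.2.1 p.2.2).countP
          (fun e => (pvEdges L).count e == 1) : Nat) : Int))).sum := by
    rw [Nat.cast_list_sum, List.map_map]; rfl
  rw [zero_add, hcast]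
  rw [List.map_congr_left (fun p hp => pv_cellB L p.1 p.2.1 p.2.2 hnd (by
    obtain ⟨px, py, ps⟩ := p; exact hp))]
  rw [pv_sum_map_const_sub]

-- ===== VERDICT (by name: the statement is the Claim_ definition above) =====
theorem get_region_perimeter_spec : Claim_equal_get_region_perimeter := by
  intro L _ hpre
  unfold Spec_get_region_perimeter
  rw [pv_A_eq, pv_B_eq L hpre]
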